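-- pv_equiv track=rewrite | github.com/eriksylvan/AdventOfCode2019 | day_08.py | getAnswerPartOne
-- ===== SOURCE A (Python) =====
-- def buildLayerImage(imgStr, width, hight):
--     '''
--     Returns a list representing the image, every layer with a string
--     '''
--     size = (width * hight)
--     layers = len(imgStr) // size
--     img = ['' for l in range(layers)]
--     for l in range(layers):
--         img[l] = imgStr[(l * size):(l * size + size)]
--     return img
--
-- def getAnswerPartOne(imgStrLayers, width, hight):
--     img = buildLayerImage(imgStrLayers, width, hight)
--     min_zero = len(img[0]) + 1  # Start value one bigger than max size
--     for layer in img: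
--         zero = layer.count('0')
--         one = layer.count('1')
--         two = layer.count('2')
--         if min_zero > zero:
--             min_zero = zero
--             p12 = one * two
--     return p12
-- ===== SOURCE B (Python) =====
-- def getAnswerPartOne(imgStrLayers, width, hight):
--     # Single streaming pass over the characters: per-layer 0/1/2 counters are
--     # accumulated in place and flushed at each layer boundary (i % size == size-1);
--     # no layer strings are ever built.
--     size = width * hight
--     n = (len(imgStrLayers) // size) * size
--     best = None  # (zeros, ones*twos) of the best layer seen so far
--     z = o = t = 0
--     for i in range(n):
--         c = imgStrLayers[i]
--         if c == '0':
--             z += 1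
--         elif c == '1':
--             o += 1
--         elif c == '2':
--             t += 1
--         if i % size == size - 1:
--             if best is None or z < best[0]:
--                 best = (z, o * t)
--             z = o = t = 0
--     return best[1]
-- ===== Notes on version B (the rewrite author's own statement) =====
-- stated objective: alternative
-- what changed: Replaces A's build-all-layer-strings-then-scan-layers design with a single streaming pass over the characters: per-layer 0/1/2 counters are accumulated in place and flushed at each layer boundary (i % size == size-1), so no layer substrings are ever materialized; trades O(n) slice allocations for constant extra space.
import Mathlib
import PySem

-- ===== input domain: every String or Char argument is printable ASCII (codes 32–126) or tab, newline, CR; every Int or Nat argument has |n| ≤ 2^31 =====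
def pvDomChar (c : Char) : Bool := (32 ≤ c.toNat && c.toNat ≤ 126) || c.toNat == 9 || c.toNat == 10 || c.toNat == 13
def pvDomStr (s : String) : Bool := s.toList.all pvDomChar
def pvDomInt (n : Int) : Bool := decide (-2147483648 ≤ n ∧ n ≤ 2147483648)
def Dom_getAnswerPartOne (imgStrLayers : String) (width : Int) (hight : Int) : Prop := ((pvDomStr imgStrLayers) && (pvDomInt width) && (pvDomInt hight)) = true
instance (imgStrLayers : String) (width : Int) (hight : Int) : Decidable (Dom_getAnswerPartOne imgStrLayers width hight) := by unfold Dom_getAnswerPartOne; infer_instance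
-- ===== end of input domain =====

-- B replaces A's build-all-layer-strings-then-scan-layers design with one streaming pass over
-- the characters, flushing per-layer 0/1/2 counters at each layer boundary (objective: alternative).

-- ===== PORT A =====
def buildLayerImage (imgStr : String) (width : Int) (hight : Int) : List (List Char) :=
  let size := width * hight
  let layers := PySem.Int.floordiv (imgStr.toList.length : Int) size
  (PySem.List.pyRange 0 layers 1).map
    (fun l => PySem.List.slice imgStr.toList (some (l * size)) (some (l * size + size)))

def getAnswerPartOne (imgStrLayers : String) (width : Int) (hight : Int) : Int :=
  let img := buildLayerImage imgStrLayers width hight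
  match PySem.List.pyGet? img 0 with
  | none => 0  -- Python raises IndexError here (img[0]); excluded by Pre_
  | some first =>
    let minZero0 : Int := (first.length : Int) + 1
    (img.foldl (fun (st : Int × Int) layer =>
        let zero : Int := (PySem.List.count layer '0' : Int)
        let one : Int := (PySem.List.count layer '1' : Int)
        let two : Int := (PySem.List.count layer '2' : Int)
        if st.1 > zero then (zero, one * two) else st) (minZero0, 0)).2

-- ===== PORT B =====
-- the `if c == '0': z += 1 elif …` chain of B's loop body on the counter triple (z, o, t)
def charStep (s : Int × Int × Int) (c : Char) : Int × Int × Int :=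
  if c = '0' then (s.1 + 1, s.2.1, s.2.2)
  else if c = '1' then (s.1, s.2.1 + 1, s.2.2)
  else if c = '2' then (s.1, s.2.1, s.2.2 + 1)
  else s

-- one iteration of B's loop: state = (best, z, o, t)
def bStep (xs : List Char) (size : Int) (st : Option (Int × Int) × Int × Int × Int)
    (i : Int) : Option (Int × Int) × Int × Int × Int :=
  let s := charStep st.2 (PySem.List.pyGetD xs i ' ')  -- i < n ≤ len on every Pre_ input
  if PySem.Int.mod i size = size - 1 then
    (match st.1 with
     | none => some (s.1, s.2.1 * s.2.2)
     | some b => if s.1 < b.1 then some (s.1, s.2.1 * s.2.2) else some b, 0, 0, 0)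
  else (st.1, s)

def getAnswerPartOne_alt (imgStrLayers : String) (width : Int) (hight : Int) : Int :=
  let size := width * hight
  let n := PySem.Int.floordiv (imgStrLayers.toList.length : Int) size * size
  let st := (PySem.List.pyRange 0 n 1).foldl (bStep imgStrLayers.toList size) (none, 0, 0, 0)
  match st.1 with
  | none => 0  -- Python raises TypeError here (best is None); excluded by Pre_
  | some b => b.2

-- ===== PRECONDITION & SPEC =====
-- Pre_ excludes exactly the inputs where A raises: size ≤ 0 (ZeroDivisionError for size = 0,
-- empty layer list otherwise) or fewer characters than one layer (img[0] IndexError).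
def Pre_getAnswerPartOne (imgStrLayers : String) (width : Int) (hight : Int) : Prop :=
  0 < width * hight ∧ width * hight ≤ (imgStrLayers.toList.length : Int)
instance (imgStrLayers : String) (width : Int) (hight : Int) : Decidable (Pre_getAnswerPartOne imgStrLayers width hight) := by unfold Pre_getAnswerPartOne; infer_instance

def pvWitness_getAnswerPartOne : String × Int × Int := ("0012", 2, 1)

def Spec_getAnswerPartOne (imgStrLayers : String) (width : Int) (hight : Int) (out : Int) : Prop := out = getAnswerPartOne_alt imgStrLayers width hight
instance (imgStrLayers : String) (width : Int) (hight : Int) (out : Int) : Decidable (Spec_getAnswerPartOne imgStrLayers width hight out) := by unfold Spec_getAnswerPartOne; infer_instance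

-- ===== CLAIM (what is proved, stated in full; the proofs are below) =====
def Claim_equal_getAnswerPartOne : Prop := ∀ (imgStrLayers : String) (width : Int) (hight : Int), Dom_getAnswerPartOne imgStrLayers width hight → Pre_getAnswerPartOne imgStrLayers width hight → Spec_getAnswerPartOne imgStrLayers width hight (getAnswerPartOne imgStrLayers width hight)

-- ===== LEMMAS AND PROOFS =====

-- abstract per-layer updates of the two programs (proof-only)
def updBest (b : Option (Int × Int)) (layer : List Char) : Option (Int × Int) :=
  match b with
  | none => some ((PySem.List.count layer '0' : Int),
      (PySem.List.count layer '1' : Int) * (PySem.List.count layer '2' : Int))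
  | some p =>
    if (PySem.List.count layer '0' : Int) < p.1 then
      some ((PySem.List.count layer '0' : Int),
        (PySem.List.count layer '1' : Int) * (PySem.List.count layer '2' : Int))
    else some p

def aStep (st : Int × Int) (layer : List Char) : Int × Int :=
  if st.1 > (PySem.List.count layer '0' : Int) then
    ((PySem.List.count layer '0' : Int),
      (PySem.List.count layer '1' : Int) * (PySem.List.count layer '2' : Int))
  else st

-- folding the elif-chain over a character list counts its '0'/'1'/'2'
theorem charStep_fold (cs : List Char) : ∀ (z o t : Int),
    cs.foldl charStep (z, o, t)
      = (z + (PySem.List.count cs '0' : Int), o + (PySem.List.count cs '1' : Int),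
          t + (PySem.List.count cs '2' : Int)) := by
  induction cs with
  | nil => intro z o t; simp [PySem.List.count_eq]
  | cons c cs ih =>
    intro z o t
    simp only [List.foldl_cons, charStep, PySem.List.count_eq] at *
    by_cases h0 : c = '0'
    · subst h0; simp [ih]; omega
    · by_cases h1 : c = '1'
      · subst h1; simp [h0, ih]; omega
      · by_cases h2 : c = '2'
        · subst h2; simp [h0, h1, ih]; omega
        · simp [h0, h1, h2, ih]

-- the characters read at indices a..c-1 are exactly the slice xs[a:c]
theorem map_pyGetD_eq_slice (xs : List Char) (a c : Int) (h0 : 0 ≤ a) (hac : a ≤ c)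
    (hc : c ≤ (xs.length : Int)) :
    (PySem.List.pyRange a c 1).map (fun i => PySem.List.pyGetD xs i ' ')
      = PySem.List.slice xs (some a) (some c) := by
  rw [PySem.List.slice_toNat _ h0 (by omega)]
  apply List.ext_getElem
  · simp [PySem.List.length_pyRange_one]; omega
  · intro k hk1 hk2
    have hk : k < (c - a).toNat := by
      simpa [PySem.List.length_pyRange_one] using hk1
    simp only [List.getElem_map, PySem.List.getElem_pyRange_one, List.getElem_take,
      List.getElem_drop]
    rw [PySem.List.pyGetD_eq_getElem _ _ (by omega) (by omega)]
    congr 1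
    omega

theorem slice_snoc (xs : List Char) (a b : Int) (h0 : 0 ≤ a) (hab : a ≤ b)
    (hb : b.toNat < xs.length) :
    PySem.List.slice xs (some a) (some (b + 1))
      = PySem.List.slice xs (some a) (some b) ++ [xs[b.toNat]] := by
  rw [PySem.List.slice_toNat _ h0 (by omega), PySem.List.slice_toNat _ h0 (by omega)]
  rw [show (b + 1).toNat = b.toNat + 1 by omega,
    show b.toNat + 1 - a.toNat = (b.toNat - a.toNat) + 1 by omega, List.take_add_one]
  congr 1
  rw [List.getElem?_drop, List.getElem?_eq_getElem (by omega)]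
  simp
  congr 1
  omega

-- the boundary test i % size == size - 1 inside a layer
theorem mod_inner (size l j : Int) (hs : 0 < size) (hj0 : 0 ≤ j) (hj : j < size - 1) :
    PySem.Int.mod (l * size + j) size ≠ size - 1 := by
  rw [PySem.Int.mod_eq_emod_of_pos hs, show l * size + j = j + size * l by ring,
    Int.add_mul_emod_self_left, Int.emod_eq_of_lt hj0 (by omega)]
  omega

theorem mod_last (size l : Int) (hs : 0 < size) :
    PySem.Int.mod (l * size + (size - 1)) size = size - 1 := by
  rw [PySem.Int.mod_eq_emod_of_pos hs, show l * size + (size - 1) = (size - 1) + size * l by ring,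
    Int.add_mul_emod_self_left, Int.emod_eq_of_lt (by omega) (by omega)]

-- before its layer's last index, B's loop only accumulates character counts
theorem fold_noBoundary (xs : List Char) (size a c : Int) (h0 : 0 ≤ a) (hac : a ≤ c)
    (hc : c ≤ (xs.length : Int))
    (hnb : ∀ i : Int, a ≤ i → i < c → PySem.Int.mod i size ≠ size - 1)
    (best : Option (Int × Int)) (z o t : Int) :
    (PySem.List.pyRange a c 1).foldl (bStep xs size) (best, z, o, t)
      = (best, (PySem.List.slice xs (some a) (some c)).foldl charStep (z, o, t)) := by
  have hcong : (PySem.List.pyRange a c 1).foldl (bStep xs size) (best, z, o, t)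
      = (PySem.List.pyRange a c 1).foldl
          (fun (st : Option (Int × Int) × Int × Int × Int) i =>
            (st.1, charStep st.2 (PySem.List.pyGetD xs i ' '))) (best, z, o, t) := by
    apply PySem.List.foldl_congr_mem
    intro st i hi
    rw [PySem.List.mem_pyRange_one] at hi
    simp only [bStep]
    rw [if_neg (hnb i hi.1 hi.2)]
  rw [hcong,
    PySem.List.foldl_prod_mk (f := fun (s : Option (Int × Int)) (_ : Int) => s)
      (g := fun (s : Int × Int × Int) i => charStep s (PySem.List.pyGetD xs i ' ')),
    PySem.List.foldl_ignore, ← List.foldl_map, map_pyGetD_eq_slice xs a c h0 hac hc]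

-- one full layer of B's loop = one updBest step on the layer's slice, counters back to 0
theorem chunk_fold (xs : List Char) (size l : Int) (hs : 0 < size) (hl : 0 ≤ l)
    (hfit : l * size + size ≤ (xs.length : Int)) (best : Option (Int × Int)) :
    (PySem.List.pyRange (l * size) (l * size + size) 1).foldl (bStep xs size) (best, 0, 0, 0)
      = (updBest best (PySem.List.slice xs (some (l * size)) (some (l * size + size))), 0, 0, 0) := by
  have ha0 : 0 ≤ l * size := mul_nonneg hl (le_of_lt hs)
  set a := l * size with hadef
  set b := a + (size - 1) with hbdef
  have hsplit : a + size = b + 1 := by omega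
  rw [hsplit, PySem.List.pyRange_one_succ_right (by omega), List.foldl_append,
    fold_noBoundary xs size a b ha0 (by omega) (by omega)
      (fun i hi1 hi2 => by
        have := mod_inner size l (i - a) hs (by omega) (by omega)
        rwa [show l * size + (i - a) = i by omega] at this)]
  simp only [List.foldl_cons, List.foldl_nil, bStep]
  rw [show b = l * size + (size - 1) from hbdef, mod_last size l hs, if_pos rfl]
  have hget : PySem.List.pyGetD xs b ' ' = xs[b.toNat] :=
    PySem.List.pyGetD_eq_getElem _ _ (by omega) (by omega)
  have hcons : charStep ((PySem.List.slice xs (some a) (some b)).foldl charStep (0, 0, 0))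
        (PySem.List.pyGetD xs b ' ')
      = (PySem.List.slice xs (some a) (some (b + 1))).foldl charStep (0, 0, 0) := by
    rw [slice_snoc xs a b ha0 (by omega) (by omega), List.foldl_append, List.foldl_cons,
      List.foldl_nil, hget]
  rw [hcons, show l * size + (size - 1) + 1 = l * size + size from by ring, charStep_fold]
  simp only [zero_add]
  cases best <;> rfl

-- B's whole loop over the first k layers = folding updBest over those k layer slices
theorem multi_chunk (xs : List Char) (size : Int) (hs : 0 < size) :
    ∀ (k : Nat), (k : Int) * size ≤ (xs.length : Int) →
    (PySem.List.pyRange 0 ((k : Int) * size) 1).foldl (bStep xs size) (none, 0, 0, 0)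
      = (((PySem.List.pyRange 0 (k : Int) 1).map
            (fun l => PySem.List.slice xs (some (l * size)) (some (l * size + size)))).foldl
            updBest none, 0, 0, 0) := by
  intro k
  induction k with
  | zero => intro _; simp [PySem.List.pyRange_one_eq_nil (le_refl (0 : Int))]
  | succ k ih =>
    intro hk
    have hc : ((k + 1 : Nat) : Int) = (k : Int) + 1 := by push_cast; ring
    have hnn : (0:Int) ≤ (k : Int) * size := mul_nonneg (by positivity) (le_of_lt hs)
    have hstep : ((k + 1 : Nat) : Int) * size = (k : Int) * size + size := by rw [hc]; ring
    have hk' : (k : Int) * size ≤ (xs.length : Int) := by rw [hstep] at hk; omega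
    rw [hstep, PySem.List.pyRange_one_append 0 ((k : Int) * size) ((k : Int) * size + size)
        hnn (by omega), List.foldl_append, ih hk',
      chunk_fold xs size (k : Int) hs (by positivity) (by omega),
      hc, PySem.List.pyRange_one_succ_right (by positivity), List.map_append,
      List.foldl_append]
    rfl

-- once both states carry a best pair, the two per-layer updates coincide
theorem updBest_some_fold (rest : List (List Char)) : ∀ (mz p : Int),
    rest.foldl updBest (some (mz, p)) = some (rest.foldl aStep (mz, p)) := by
  induction rest with
  | nil => intro mz p; rfl
  | cons layer rest ih =>
    intro mz p
    simp only [List.foldl_cons, updBest, aStep, gt_iff_lt]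
    split_ifs with h <;> exact ih _ _

theorem getAnswerPartOne_eq_alt (imgStrLayers : String) (width : Int) (hight : Int)
    (hpos : 0 < width * hight) (hlen : width * hight ≤ (imgStrLayers.toList.length : Int)) :
    getAnswerPartOne imgStrLayers width hight = getAnswerPartOne_alt imgStrLayers width hight := by
  set xs := imgStrLayers.toList with hxs
  set size := width * hight with hsize
  set L := PySem.Int.floordiv (xs.length : Int) size with hL
  have hL1 : 1 ≤ L := (PySem.Int.le_floordiv_iff_mul_le hpos).mpr (by omega)
  have hLlen : L * size ≤ (xs.length : Int) := by
    have h1 : L * size + PySem.Int.mod (xs.length : Int) size = (xs.length : Int) :=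
      PySem.Int.floordiv_mul_add_mod (xs.length : Int) size
    have h2 := PySem.Int.mod_nonneg (xs.length : Int) hpos
    omega
  have hKcast : ((L.toNat : Nat) : Int) = L := by omega
  have hB := multi_chunk xs size hpos L.toNat (by rw [hKcast]; exact hLlen)
  rw [hKcast] at hB
  have himg : buildLayerImage imgStrLayers width hight
      = (PySem.List.pyRange 0 L 1).map
          (fun l => PySem.List.slice xs (some (l * size)) (some (l * size + size))) := rfl
  have hcons : PySem.List.pyRange 0 L 1 = 0 :: PySem.List.pyRange 1 L 1 := by
    simpa using PySem.List.pyRange_one_cons (by omega : (0:Int) < L)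
  set first := PySem.List.slice xs (some ((0:Int) * size)) (some ((0:Int) * size + size)) with hfirst
  set rest := (PySem.List.pyRange 1 L 1).map
      (fun l => PySem.List.slice xs (some (l * size)) (some (l * size + size))) with hrest
  have himg2 : buildLayerImage imgStrLayers width hight = first :: rest := by
    rw [himg, hcons, List.map_cons]
  have hcount : (PySem.List.count first '0' : Int) < (first.length : Int) + 1 := by
    rw [PySem.List.count_eq]
    have := List.count_le_length (a := '0') (l := first)
    omega
  have hBfold : ((first :: rest).foldl updBest none)
      = some ((first :: rest).foldl aStep ((first.length : Int) + 1, 0)) := by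
    rw [List.foldl_cons, List.foldl_cons]
    have h1 : updBest none first
        = some ((PySem.List.count first '0' : Int),
            (PySem.List.count first '1' : Int) * (PySem.List.count first '2' : Int)) := rfl
    have h2 : aStep ((first.length : Int) + 1, 0) first
        = ((PySem.List.count first '0' : Int),
            (PySem.List.count first '1' : Int) * (PySem.List.count first '2' : Int)) := by
      simp only [aStep, gt_iff_lt]
      rw [if_pos hcount]
    rw [h1, h2, updBest_some_fold]
  show getAnswerPartOne imgStrLayers width hight = getAnswerPartOne_alt imgStrLayers width hight
  unfold getAnswerPartOne getAnswerPartOne_alt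
  simp only [← hxs, ← hsize, ← hL]
  rw [himg2, PySem.List.pyGet?_zero_cons, hB, hcons, List.map_cons, ← hfirst, ← hrest, hBfold]
  rfl

-- ===== VERDICT (by name: the statement is the Claim_ definition above) =====
theorem getAnswerPartOne_spec : Claim_equal_getAnswerPartOne := by
  intro imgStrLayers width hight _ hpre
  unfold Spec_getAnswerPartOne
  exact getAnswerPartOne_eq_alt imgStrLayers width hight hpre.1 hpre.2
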